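-- pv_equiv track=rewrite | github.com/shurane/problems | leetcode/smallest-string-with-a-given-numeric-value.py | getSmallestStringIterative
-- ===== SOURCE A (Python) =====
-- def getSmallestStringIterative(n: int, k: int) -> str:
--     res = []
--     while n > 0:
--         # k - n + 1 is how many spots to reserve with 'a' in the beginning of the string
--         value = min(26, k - n + 1)
--         letter = chr(value + 96)
--         res.append(letter)
--         n -= 1
--         k -= value
--
--     return "".join(reversed(res))
-- ===== SOURCE B (Python) =====
-- def getSmallestStringIterative(n: int, k: int) -> str:
--     # closed form: surplus e = k - n over the all-'a' baseline becomes e // 25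
--     # trailing 'z's (clamped into [0, n]) plus one middle letter for the remainder
--     if n <= 0:
--         return ''
--     e = k - n
--     z = max(0, min(n, e // 25))
--     r = e - 25 * z
--     if r and z < n:
--         return 'a' * (n - z - 1) + chr(97 + r) + 'z' * z
--     return 'a' * (n - z) + 'z' * z
-- ===== Notes on version B (the rewrite author's own statement) =====
-- stated objective: faster
-- what changed: Replaces A's per-character Python loop (n iterations building a list, then reverse+join) with a closed form: surplus e = k - n gives e // 25 trailing 'z's (clamped into [0, n]), one middle letter for the remainder, and leading 'a's, built with bulk string repetition instead of a per-character loop; Pre_ excludes only the inputs (n >= 1 and k < n - 97) on which both programs raise ValueError from chr of a negative code.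
import Mathlib
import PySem

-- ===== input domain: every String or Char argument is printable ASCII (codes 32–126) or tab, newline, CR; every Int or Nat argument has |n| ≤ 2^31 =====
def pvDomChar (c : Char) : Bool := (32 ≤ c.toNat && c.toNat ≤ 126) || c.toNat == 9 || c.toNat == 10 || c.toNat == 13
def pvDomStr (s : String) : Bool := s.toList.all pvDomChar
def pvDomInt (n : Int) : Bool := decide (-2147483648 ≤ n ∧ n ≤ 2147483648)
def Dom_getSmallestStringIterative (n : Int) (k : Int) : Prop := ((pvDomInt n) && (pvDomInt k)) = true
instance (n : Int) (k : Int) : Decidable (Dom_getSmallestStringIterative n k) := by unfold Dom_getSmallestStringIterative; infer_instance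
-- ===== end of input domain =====

-- B replaces A's per-character loop by a closed form over counts (leading 'a's, one middle
-- letter, trailing 'z's clamped into [0, n]); Pre_ excludes only the inputs where both raise.

-- ===== PORT A =====
-- while n > 0: value = min(26, k-n+1); res.append(chr(value+96)); n -= 1; k -= value
def aLoop (n k : Int) (res : List Char) : List Char :=
  if n > 0 then
    aLoop (n - 1) (k - min 26 (k - n + 1)) (res ++ [Char.ofNat (min 26 (k - n + 1) + 96).toNat])
  else res
termination_by n.toNat
decreasing_by omega

-- "".join(reversed(res))
def getSmallestStringIterative (n : Int) (k : Int) : String :=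
  String.mk ((aLoop n k []).reverse)

-- ===== PORT B =====
-- e = k - n; z = max(0, min(n, e // 25)); r = e - 25*z;
-- 'a'*(n-z-1) + chr(97+r) + 'z'*z  if r and z < n  else  'a'*(n-z) + 'z'*z
def bChars (n k : Int) : List Char :=
  let e := k - n
  let z := max 0 (min n (PySem.Int.floordiv e 25))
  let r := e - 25 * z
  if r ≠ 0 ∧ z < n then
    PySem.List.pyRepeat ['a'] (n - z - 1) ++ [Char.ofNat (97 + r).toNat] ++ PySem.List.pyRepeat ['z'] z
  else
    PySem.List.pyRepeat ['a'] (n - z) ++ PySem.List.pyRepeat ['z'] z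

-- if n <= 0: return ''
def getSmallestStringIterative_alt (n : Int) (k : Int) : String :=
  if n ≤ 0 then "" else String.mk (bChars n k)

-- ===== PRECONDITION & SPEC =====
-- Pre_ excludes exactly the inputs (1 ≤ n and k < n - 97) on which A raises
-- ValueError (chr of a negative code); B raises the same ValueError there.
def Pre_getSmallestStringIterative (n : Int) (k : Int) : Prop :=
  n ≤ 0 ∨ n - 97 ≤ k
instance (n : Int) (k : Int) : Decidable (Pre_getSmallestStringIterative n k) := by
  unfold Pre_getSmallestStringIterative; infer_instance

def pvWitness_getSmallestStringIterative : Int × Int := (3, 30)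

def Spec_getSmallestStringIterative (n : Int) (k : Int) (out : String) : Prop :=
  out = getSmallestStringIterative_alt n k
instance (n : Int) (k : Int) (out : String) : Decidable (Spec_getSmallestStringIterative n k out) := by
  unfold Spec_getSmallestStringIterative; infer_instance

-- ===== CLAIM (what is proved, stated in full; the proofs are below) =====
def Claim_equal_getSmallestStringIterative : Prop :=
  ∀ (n : Int) (k : Int), Dom_getSmallestStringIterative n k →
    Pre_getSmallestStringIterative n k →
    Spec_getSmallestStringIterative n k (getSmallestStringIterative n k)

-- ===== LEMMAS AND PROOFS =====

lemma aLoop_append : ∀ (N : Nat) (n k : Int) (res : List Char), n.toNat = N →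
    aLoop n k res = res ++ aLoop n k [] := by
  intro N
  induction N with
  | zero =>
    intro n k res hN
    have h : ¬ n > 0 := by omega
    conv_lhs => rw [aLoop]
    conv_rhs => rw [aLoop]
    simp [h]
  | succ N ih =>
    intro n k res hN
    by_cases h : n > 0
    · conv_lhs => rw [aLoop]
      conv_rhs => rw [aLoop]
      simp only [h, if_pos, List.nil_append]
      rw [ih (n-1) _ (res ++ [_]) (by omega), ih (n-1) _ [_] (by omega)]
      simp [List.append_assoc]
    · conv_lhs => rw [aLoop]
      conv_rhs => rw [aLoop]
      simp [h]

-- B's character list, written with Lean's own / on the surplus e = k - n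
def cChars (n e : Int) : List Char :=
  let z := max 0 (min n (e / 25))
  let r := e - 25 * z
  if r ≠ 0 ∧ z < n then
    List.replicate (n - z - 1).toNat 'a' ++ [Char.ofNat (97 + r).toNat]
      ++ List.replicate z.toNat 'z'
  else
    List.replicate (n - z).toNat 'a' ++ List.replicate z.toNat 'z'

lemma bChars_eq (n k : Int) : bChars n k = cChars n (k - n) := by
  unfold bChars cChars
  dsimp only
  rw [PySem.Int.floordiv_eq_ediv_of_pos (by omega : (0:Int) < 25)]
  by_cases hc : k - n - 25 * (max 0 (min n ((k - n) / 25))) ≠ 0 ∧ max 0 (min n ((k - n) / 25)) < n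
  · simp [hc, PySem.List.pyRepeat_singleton]
  · simp [PySem.List.pyRepeat_singleton]

lemma cChars_zero_n (e : Int) : cChars 0 e = [] := by
  unfold cChars
  simp

lemma cChars_zero (n : Int) (hn : 0 ≤ n) : cChars n 0 = List.replicate n.toNat 'a' := by
  unfold cChars
  dsimp only
  have hz : max 0 (min n (0 / 25)) = 0 := by omega
  rw [hz]
  norm_num

lemma cChars_step_z (n e : Int) (hn : 1 ≤ n) (h25 : 25 ≤ e) :
    cChars (n - 1) (e - 25) ++ ['z'] = cChars n e := by
  unfold cChars
  dsimp only
  have hd : (e - 25) / 25 = e / 25 - 1 := by omega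
  rw [hd]
  have hz1 : 1 ≤ e / 25 := by omega
  set z : Int := max 0 (min n (e / 25)) with hzdef
  have hzeq : max 0 (min (n - 1) (e / 25 - 1)) = z - 1 := by omega
  rw [hzeq]
  have hz1' : 1 ≤ z := by omega
  have hr : e - 25 - 25 * (z - 1) = e - 25 * z := by ring
  rw [hr]
  have hzt : z.toNat = (z - 1).toNat + 1 := by omega
  have hrep : List.replicate z.toNat 'z' =
      List.replicate (z - 1).toNat 'z' ++ ['z'] := by
    rw [hzt, List.replicate_succ']
  have hc1 : n - 1 - (z - 1) - 1 = n - z - 1 := by ring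
  have hc2 : n - 1 - (z - 1) = n - z := by ring
  rw [hc1, hc2, hrep]
  have hcond : (e - 25 * z ≠ 0 ∧ z - 1 < n - 1) ↔ (e - 25 * z ≠ 0 ∧ z < n) := by omega
  simp only [hcond]
  split_ifs with hb
  · simp [List.append_assoc]
  · simp [List.append_assoc]

lemma cChars_step_mid (n e : Int) (h25 : e < 25) (h1 : 1 ≤ n) :
    List.replicate (n - 1).toNat 'a' ++ [Char.ofNat (e + 1 + 96).toNat] = cChars n e := by
  unfold cChars
  dsimp only
  have hz : max 0 (min n (e / 25)) = 0 := by omega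
  rw [hz]
  by_cases hr : e = 0
  · subst hr
    norm_num
    have hn : n.toNat = (n - 1).toNat + 1 := by omega
    rw [hn, List.replicate_succ']
    norm_num
    decide
  · have hb : e - 25 * 0 ≠ 0 ∧ (0:Int) < n := ⟨by omega, by omega⟩
    rw [if_pos hb]
    have he97 : 97 + (e - 25 * 0) = e + 1 + 96 := by ring
    have hc : n - 0 - 1 = n - 1 := by ring
    rw [he97, hc]
    simp

lemma main_lemma : ∀ (N : Nat) (n k : Int), n.toNat = N → 0 ≤ n → n - 97 ≤ k →
    (aLoop n k []).reverse = cChars n (k - n) := by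
  intro N
  induction N with
  | zero =>
    intro n k hN h0 h1
    have hn : n = 0 := by omega
    subst hn
    rw [aLoop]
    norm_num [cChars_zero_n]
  | succ N ih =>
    intro n k hN h0 h1
    have hpos : n > 0 := by omega
    rw [aLoop]
    simp only [hpos, if_pos, List.nil_append]
    rw [aLoop_append N (n-1) _ _ (by omega)]
    simp only [List.singleton_append, List.reverse_cons]
    by_cases hbig : 25 ≤ k - n
    · have hmin : min 26 (k - n + 1) = 26 := by omega
      rw [hmin]
      rw [ih (n-1) (k-26) (by omega) (by omega) (by omega)]
      have he' : k - 26 - (n - 1) = (k - n) - 25 := by ring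
      have hch : Char.ofNat ((26:Int) + 96).toNat = 'z' := by decide
      rw [he', hch, cChars_step_z n (k - n) (by omega) hbig]
    · have hmin : min 26 (k - n + 1) = (k - n) + 1 := by omega
      rw [hmin]
      have hk' : k - (k - n + 1) = n - 1 := by ring
      rw [hk']
      rw [ih (n-1) (n-1) (by omega) (by omega) (by omega)]
      have hz : n - 1 - (n - 1) = 0 := by ring
      rw [hz, cChars_zero (n-1) (by omega)]
      exact cChars_step_mid n (k - n) (by omega) (by omega)

-- ===== VERDICT (by name: the statement is the Claim_ definition above) =====
theorem getSmallestStringIterative_spec : Claim_equal_getSmallestStringIterative := by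
  intro n k _hdom hpre
  unfold Spec_getSmallestStringIterative getSmallestStringIterative getSmallestStringIterative_alt
  by_cases hn : n ≤ 0
  · rw [aLoop]
    have h : ¬ n > 0 := by omega
    simp only [h, if_neg, not_false_iff, hn, if_pos, List.reverse_nil]
    decide
  · have h0 : 0 ≤ n := by omega
    have h1 : n - 97 ≤ k := by
      rcases hpre with h | h
      · omega
      · exact h
    simp only [hn, if_neg, not_false_iff]
    rw [main_lemma n.toNat n k rfl h0 h1, bChars_eq n k]
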